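-- pv_equiv track=rewrite | github.com/johnphipps4/NLP-MarkovModel | Code/main.py | getTagTokCount
-- ===== SOURCE A (Python) =====
-- def getTagTokCount(tgs,tkns):
--     """ receives list of tokens and returns a 2D dictionary for
--     bigram frequencies"""
--
--     countdict = dict()
--     for i in range(len(tkns)-1):
--         tag = tgs[i]
--         word = tkns[i]
--         if tag in countdict.keys():
--             if word in countdict[tag].keys():
--                 countdict[tag][word] += 1
--             else:
--                 countdict[tag][word] = 1
--         else:
--             countdict[tag] = {word: 1}
--     return countdict
-- ===== SOURCE B (Python) =====
-- def getTagTokCount(tgs, tkns):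
--     """Flat-count-then-reshape: one pass accumulates (tag, word) pair counts
--     in a flat dict, a second pass reshapes the flat table into the nested
--     2D dictionary."""
--     flat = {}
--     for i in range(len(tkns) - 1):
--         key = (tgs[i], tkns[i])
--         flat[key] = flat.get(key, 0) + 1
--     countdict = {}
--     for (tag, word), c in flat.items():
--         inner = countdict.get(tag, {})
--         inner[word] = c
--         countdict[tag] = inner
--     return countdict
-- ===== Notes on version B (the rewrite author's own statement) =====
-- stated objective: alternative
-- what changed: A builds the nested dict incrementally with membership checks per (tag, word) pair; B first accumulates all counts in a flat dict keyed by the (tag, word) tuple and then reshapes that flat table into the nested dict in a second pass.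
import Mathlib
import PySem

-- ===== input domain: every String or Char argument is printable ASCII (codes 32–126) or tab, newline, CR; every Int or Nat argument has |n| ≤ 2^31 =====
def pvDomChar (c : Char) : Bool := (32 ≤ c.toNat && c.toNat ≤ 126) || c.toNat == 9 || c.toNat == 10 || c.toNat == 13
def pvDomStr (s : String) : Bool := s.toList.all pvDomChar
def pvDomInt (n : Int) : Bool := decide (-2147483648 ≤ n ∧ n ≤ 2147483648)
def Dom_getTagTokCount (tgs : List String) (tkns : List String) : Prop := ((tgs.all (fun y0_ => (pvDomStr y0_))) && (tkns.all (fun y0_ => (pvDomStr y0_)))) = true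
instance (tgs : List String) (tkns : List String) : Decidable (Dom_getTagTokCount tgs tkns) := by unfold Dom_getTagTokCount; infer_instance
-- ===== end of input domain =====

-- B replaces A's incremental nested-dict inserts by a flat (tag,word)->count pass plus a reshape pass; objective: alternative decomposition, not faster.
-- Dicts are returned as insertion-ordered association lists (inner dicts as lists too).

-- ===== PORT A =====
-- loop body of A: tag = tgs[i]; word = tkns[i]; nested membership checks and insert
def pvStepA (d : PySem.Dict String (PySem.Dict String Int)) (p : String × String) :
    PySem.Dict String (PySem.Dict String Int) :=
  if d.contains p.1 then
    let inner := d.getD p.1 PySem.Dict.empty   -- countdict[tag]; key present in this branch, so getD is exact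
    if inner.contains p.2 then
      d.insert p.1 (inner.insert p.2 (inner.getD p.2 0 + 1))
    else
      d.insert p.1 (inner.insert p.2 1)
  else
    d.insert p.1 (PySem.Dict.empty.insert p.2 1)

-- under Pre_ every index i < len(tkns)-1 is in range for both lists, so List.getD is exact
def getTagTokCount (tgs : List String) (tkns : List String) : List (String × List (String × Int)) :=
  (((List.range (tkns.length - 1)).foldl
      (fun d i => pvStepA d (tgs.getD i "", tkns.getD i "")) PySem.Dict.empty).items).map
    (fun q => (q.1, q.2.items))

-- ===== PORT B =====
-- first pass of B: flat[(tag,word)] = flat.get((tag,word), 0) + 1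
def pvStepF (F : PySem.Dict (String × String) Int) (p : String × String) :
    PySem.Dict (String × String) Int :=
  F.insert p (F.getD p 0 + 1)

-- second pass of B: inner = countdict.get(tag, {}); inner[word] = c; countdict[tag] = inner
def pvStepR (d : PySem.Dict String (PySem.Dict String Int)) (q : (String × String) × Int) :
    PySem.Dict String (PySem.Dict String Int) :=
  d.insert q.1.1 ((d.getD q.1.1 PySem.Dict.empty).insert q.1.2 q.2)

def getTagTokCount_alt (tgs : List String) (tkns : List String) : List (String × List (String × Int)) :=
  let flat := (List.range (tkns.length - 1)).foldl
      (fun F i => pvStepF F (tgs.getD i "", tkns.getD i "")) PySem.Dict.empty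
  ((flat.items.foldl pvStepR PySem.Dict.empty).items).map (fun q => (q.1, q.2.items))

-- ===== PRECONDITION & SPEC =====
-- Pre_ excludes exactly the inputs where A raises IndexError: tgs[i] with i running to len(tkns)-2.
def Pre_getTagTokCount (tgs : List String) (tkns : List String) : Prop :=
  (tkns.length : Int) - 1 ≤ (tgs.length : Int)
instance (tgs : List String) (tkns : List String) : Decidable (Pre_getTagTokCount tgs tkns) := by
  unfold Pre_getTagTokCount; infer_instance

def pvWitness_getTagTokCount : List String × List String :=
  (["D", "N", "D"], ["the", "cat", "the", "dog"])

def Spec_getTagTokCount (tgs : List String) (tkns : List String) (out : List (String × List (String × Int))) : Prop := out = getTagTokCount_alt tgs tkns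
instance (tgs : List String) (tkns : List String) (out : List (String × List (String × Int))) : Decidable (Spec_getTagTokCount tgs tkns out) := by unfold Spec_getTagTokCount; infer_instance

-- ===== CLAIM (what is proved, stated in full; the proofs are below) =====
def Claim_equal_getTagTokCount : Prop := ∀ (tgs : List String) (tkns : List String), Dom_getTagTokCount tgs tkns → Pre_getTagTokCount tgs tkns → Spec_getTagTokCount tgs tkns (getTagTokCount tgs tkns)

-- ===== LEMMAS AND PROOFS =====

def pvReshape (L : List ((String × String) × Int)) : PySem.Dict String (PySem.Dict String Int) :=
  L.foldl pvStepR PySem.Dict.empty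

-- outer keys of the reshaped dict are exactly the tags of L
theorem pvContainsR (L : List ((String × String) × Int)) (t : String) :
    (pvReshape L).contains t = true ↔ t ∈ L.map (fun q => q.1.1) := by
  induction L using List.reverseRecOn with
  | nil => simp [pvReshape]
  | append_singleton L q0 IH =>
    simp only [pvReshape, List.foldl_append, List.foldl_cons, List.foldl_nil] at *
    simp [pvStepR, PySem.Dict.contains_insert, IH]
    exact or_comm

-- inner keys of the reshaped dict at tag t are exactly the words paired with t in L
theorem pvKeysR (L : List ((String × String) × Int)) (t w : String) :
    ((pvReshape L).getD t PySem.Dict.empty).contains w = true ↔ (t, w) ∈ L.map (fun q => q.1) := by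
  induction L using List.reverseRecOn with
  | nil => simp [pvReshape]
  | append_singleton L q0 IH =>
    obtain ⟨⟨t0, w0⟩, c0⟩ := q0
    simp only [pvReshape, List.foldl_append, List.foldl_cons, List.foldl_nil] at *
    by_cases ht : t = t0
    · subst ht
      simp [pvStepR, PySem.Dict.contains_insert, IH, Prod.ext_iff]
      tauto
    · simp [pvStepR, PySem.Dict.getD_insert, IH, Prod.ext_iff, ht]

-- with nodup keys, the reshaped dict stores L's value at each pair key
theorem pvValR (L : List ((String × String) × Int)) (hnd : (L.map (fun q => q.1)).Nodup)
    (t w : String) (c : Int) (hmem : ((t, w), c) ∈ L) :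
    ((pvReshape L).getD t PySem.Dict.empty).getD w 0 = c := by
  induction L using List.reverseRecOn with
  | nil => simp at hmem
  | append_singleton L q0 IH =>
    obtain ⟨⟨t0, w0⟩, c0⟩ := q0
    simp only [List.map_append, List.map_cons, List.map_nil, List.nodup_append] at hnd
    simp only [pvReshape, List.foldl_append, List.foldl_cons, List.foldl_nil] at *
    rcases List.mem_append.mp hmem with hin | hlast
    · have hkey : (t, w) ∈ L.map (fun q => q.1) := List.mem_map.mpr ⟨_, hin, rfl⟩
      have hne : (t, w) ≠ (t0, w0) := by
        intro h
        exact hnd.2.2 (t, w) hkey (t0, w0) (by simp) h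
      by_cases ht : t = t0
      · subst ht
        have hw : w ≠ w0 := fun h => hne (by rw [h])
        simp [pvStepR, PySem.Dict.getD_insert_self, PySem.Dict.getD_insert, hw,
          IH hnd.1 hin]
      · simp [pvStepR, PySem.Dict.getD_insert, ht, IH hnd.1 hin]
    · simp only [List.mem_singleton] at hlast
      obtain ⟨⟨rfl, rfl⟩, rfl⟩ : ((t, w), c) = ((t0, w0), c0) := hlast
      simp [pvStepR, PySem.Dict.getD_insert_self]

-- two inserts at distinct keys commute when the first key is already present
theorem pvInsertComm {ν : Type} (d : PySem.Dict String ν) (k k' : String) (v v' : ν)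
    (hne : k ≠ k') (hc : d.contains k = true) :
    (d.insert k v).insert k' v' = (d.insert k' v').insert k v := by
  apply PySem.Dict.ext
  by_cases hk' : d.contains k' = true
  · rw [PySem.Dict.items_insert_of_contains _ _
        (by rw [PySem.Dict.contains_insert]; simp [hk']),
      PySem.Dict.items_insert_of_contains _ _ hc,
      PySem.Dict.items_insert_of_contains _ _
        (by rw [PySem.Dict.contains_insert]; simp [hc]),
      PySem.Dict.items_insert_of_contains _ _ hk', List.map_map, List.map_map]
    refine List.map_congr_left fun p _ => ?_
    by_cases h1 : p.1 = k <;> by_cases h2 : p.1 = k' <;>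
      simp [Function.comp, h1, h2, hne, Ne.symm hne]
  · rw [Bool.not_eq_true] at hk'
    rw [PySem.Dict.items_insert_of_not_contains _ _
        (by rw [PySem.Dict.contains_insert]; simp [hk', Ne.symm hne]),
      PySem.Dict.items_insert_of_contains _ _ hc,
      PySem.Dict.items_insert_of_contains _ _
        (by rw [PySem.Dict.contains_insert]; simp [hc]),
      PySem.Dict.items_insert_of_not_contains _ _ hk', List.map_append]
    simp [Ne.symm hne]

-- replacing the value at an existing pair key of L re-inserts it in the reshaped dict
theorem pvReshapeReplace (L : List ((String × String) × Int))
    (hnd : (L.map (fun q => q.1)).Nodup) (t w : String) (v' : Int)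
    (hmem : (t, w) ∈ L.map (fun q => q.1)) :
    pvReshape (L.map (fun q => if q.1 == (t, w) then ((t, w), v') else q))
      = (pvReshape L).insert t (((pvReshape L).getD t PySem.Dict.empty).insert w v') := by
  induction L using List.reverseRecOn with
  | nil => simp at hmem
  | append_singleton L q0 IH =>
    obtain ⟨⟨t0, w0⟩, c0⟩ := q0
    simp only [List.map_append, List.map_cons, List.map_nil, List.nodup_append] at hnd
    simp only [pvReshape, List.map_append, List.foldl_append, List.foldl_cons,
      List.foldl_nil, List.map_cons, List.map_nil] at *
    by_cases hlast : ((t0, w0) : String × String) = (t, w)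
    · have hnotin : (t, w) ∉ L.map (fun q => q.1) := fun hin =>
        hnd.2.2 (t, w) hin (t0, w0) (by simp) hlast.symm
      have hid : L.map (fun q => if (q.1 == (t, w)) = true then ((t, w), v') else q) = L := by
        rw [show L = L.map id from (List.map_id L).symm]
        rw [List.map_map]
        refine List.map_congr_left fun q hq => ?_
        have hq1 : q.1 ≠ (t, w) := fun h => hnotin (List.mem_map.mpr ⟨_, hq, h⟩)
        simp [hq1]
      rw [hlast, hid]
      simp [pvStepR, PySem.Dict.getD_insert_self, PySem.Dict.insert_insert_self]
    · have hin : (t, w) ∈ L.map (fun q => q.1) := by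
        rcases List.mem_append.mp hmem with h | h
        · exact h
        · rw [List.mem_singleton] at h
          exact absurd h.symm hlast
      have hbeq : ((((t0, w0) : String × String) == (t, w)) = true) = False := by
        simp [hlast]
      simp only [hbeq, if_false]
      rw [IH hnd.1 hin]
      by_cases ht : t0 = t
      · subst ht
        have hw : w0 ≠ w := fun h => hlast (by rw [h])
        simp only [pvStepR, PySem.Dict.getD_insert_self, PySem.Dict.insert_insert_self]
        exact congrArg (fun I => (List.foldl pvStepR PySem.Dict.empty L).insert t0 I)
          (pvInsertComm _ w w0 v' c0 (Ne.symm hw)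
            (by simpa [pvReshape] using (pvKeysR L t0 w).mpr hin))
      · have hct : (List.foldl pvStepR PySem.Dict.empty L).contains t = true := by
          refine (pvContainsR L t).mpr ?_
          rcases List.mem_map.mp hin with ⟨q, hq, hq1⟩
          exact List.mem_map.mpr ⟨q, hq, by rw [hq1]⟩
        simp only [pvStepR, PySem.Dict.getD_insert, ht, if_neg (Ne.symm ht)]
        exact pvInsertComm _ t t0 _ _ (fun h => ht h.symm) hct

-- main invariant: A's incremental nested fold equals reshape of B's flat fold
theorem pvMain (ps : List (String × String)) :
    ps.foldl pvStepA PySem.Dict.empty = pvReshape (ps.foldl pvStepF PySem.Dict.empty).items := by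
  induction ps using List.reverseRecOn with
  | nil => rfl
  | append_singleton ps p IH =>
    obtain ⟨t, w⟩ := p
    have hnd : (ps.foldl pvStepF PySem.Dict.empty).keys.Nodup := by
      rw [show pvStepF = (fun (d : PySem.Dict (String × String) Int) x =>
          d.insert x ((fun (d : PySem.Dict (String × String) Int)
            (x : String × String) => d.getD x 0 + 1) d x)) from rfl]
      exact PySem.Dict.nodup_keys_foldl_insert ps _ _ PySem.Dict.nodup_keys_empty
    set F := ps.foldl pvStepF PySem.Dict.empty with hF
    have hfold : (ps ++ [(t, w)]).foldl pvStepF PySem.Dict.empty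
        = F.insert (t, w) (F.getD (t, w) 0 + 1) := by
      rw [List.foldl_append]; rfl
    rw [List.foldl_append, List.foldl_cons, List.foldl_nil, IH, hfold]
    by_cases hc : F.contains (t, w) = true
    · -- the pair was already counted: flat items get an in-place value replacement
      obtain ⟨c, hget⟩ : ∃ c, F.get? (t, w) = some c := by
        rw [PySem.Dict.contains_eq_isSome_get?] at hc
        exact Option.isSome_iff_exists.mp hc
      have hgd : F.getD (t, w) 0 = c := PySem.Dict.getD_of_get?_eq_some F 0 hget
      have hitem : ((t, w), c) ∈ F.items := PySem.Dict.mem_items_of_get?_eq_some F hget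
      have hkey : (t, w) ∈ F.items.map (fun q => q.1) :=
        List.mem_map.mpr ⟨_, hitem, rfl⟩
      have hndi : (F.items.map (fun q => q.1)).Nodup := hnd
      rw [PySem.Dict.items_insert_of_contains _ _ hc,
        pvReshapeReplace F.items hndi t w _ hkey]
      have hct : (pvReshape F.items).contains t = true := by
        refine (pvContainsR F.items t).mpr ?_
        rcases List.mem_map.mp hkey with ⟨q, hq, hq1⟩
        exact List.mem_map.mpr ⟨q, hq, by rw [hq1]⟩
      have hcw : ((pvReshape F.items).getD t PySem.Dict.empty).contains w = true :=
        (pvKeysR F.items t w).mpr hkey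
      have hval : ((pvReshape F.items).getD t PySem.Dict.empty).getD w 0 = c :=
        pvValR F.items hndi t w c hitem
      simp [pvStepA, hct, hcw, hval, hgd]
    · -- a fresh pair: flat items get a new (pair, 1) entry appended
      rw [Bool.not_eq_true] at hc
      have hnokey : (t, w) ∉ F.items.map (fun q => q.1) := by
        intro hkey
        rw [show F.items.map (fun q => q.1) = F.keys from rfl] at hkey
        exact absurd ((PySem.Dict.contains_iff_mem_keys F (t, w)).mpr hkey)
          (by simp [hc])
      have hcw : ((pvReshape F.items).getD t PySem.Dict.empty).contains w = false := by
        rw [← Bool.not_eq_true]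
        intro h
        exact hnokey ((pvKeysR F.items t w).mp h)
      rw [PySem.Dict.items_insert_of_not_contains _ _ hc,
        PySem.Dict.getD_of_not_contains _ _ hc]
      have hresh : pvReshape (F.items ++ [((t, w), 0 + 1)])
          = (pvReshape F.items).insert t
              (((pvReshape F.items).getD t PySem.Dict.empty).insert w (0 + 1)) := by
        simp [pvReshape, List.foldl_append, pvStepR]
      rw [hresh]
      by_cases hct : (pvReshape F.items).contains t = true
      · simp [pvStepA, hct, hcw]
      · rw [Bool.not_eq_true] at hct
        simp [pvStepA, hct, PySem.Dict.getD_of_not_contains _ _ hct]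

-- ===== VERDICT (by name: the statement is the Claim_ definition above) =====
theorem getTagTokCount_spec : Claim_equal_getTagTokCount := by
  intro tgs tkns _ _
  unfold Spec_getTagTokCount getTagTokCount getTagTokCount_alt
  have hA : (List.range (tkns.length - 1)).foldl
      (fun d i => pvStepA d (tgs.getD i "", tkns.getD i "")) PySem.Dict.empty
      = ((List.range (tkns.length - 1)).map (fun i => (tgs.getD i "", tkns.getD i ""))).foldl
          pvStepA PySem.Dict.empty := by rw [List.foldl_map]
  have hB : (List.range (tkns.length - 1)).foldl
      (fun F i => pvStepF F (tgs.getD i "", tkns.getD i "")) PySem.Dict.empty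
      = ((List.range (tkns.length - 1)).map (fun i => (tgs.getD i "", tkns.getD i ""))).foldl
          pvStepF PySem.Dict.empty := by rw [List.foldl_map]
  simp only [hA, hB, pvMain, pvReshape]
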